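-- pv_equiv track=rewrite | github.com/MNametissa/n8n_nodes_collector | collector/src/n8n_nodes_collector/extract.py | flatten_supporting_sections
-- ===== SOURCE A (Python) =====
-- def flatten_supporting_sections(
--     sections: dict[str, list[str]],
--     include_heading_labels: bool,
-- ) -> list[str]:
--     """Flatten page-specific sections into a single canonical bucket."""
--
--     flattened: list[str] = []
--     for key, values in sections.items():
--         if key != "summary" and include_heading_labels:
--             append_once(flattened, humanize_section_key(key))
--         for value in values:
--             append_once(flattened, value)
--     return flattened
--
-- def append_once(target: list[str], value: str) -> None:
--     """Append a string once while preserving order."""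
--
--     if value and value not in target:
--         target.append(value)
--
-- def humanize_section_key(value: str) -> str:
--     """Convert a normalized section key back into human-readable text."""
--
--     return value.replace("_", " ").strip().title()
-- ===== SOURCE B (Python) =====
-- def flatten_supporting_sections(
--     sections: dict[str, list[str]],
--     include_heading_labels: bool,
-- ) -> list[str]:
--     """Flatten page-specific sections into a single canonical bucket."""
--     # Stage 1: materialize the full ordered candidate stream (headings + values).
--     candidates: list[str] = []
--     for key, values in sections.items():
--         if key != "summary" and include_heading_labels:
--             candidates.append(humanize_section_key(key))
--         candidates.extend(values)
--     # Stage 2: stateless positional filter — keep an element iff it is truthy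
--     # and this position is its first occurrence in the stream.
--     return [c for i, c in enumerate(candidates) if c and c not in candidates[:i]]
--
--
-- def humanize_section_key(value: str) -> str:
--     return value.replace("_", " ").strip().title()
-- ===== Notes on version B (the rewrite author's own statement) =====
-- stated objective: alternative
-- what changed: Replaces A's fused accumulator loop (append_once checking membership in the growing result) with two staged passes: materialize the whole ordered candidate stream, then a stateless positional filter keeping element i iff it is truthy and absent from candidates[:i] (first-occurrence-by-position), with no accumulator or seen structure.
import Mathlib
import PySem

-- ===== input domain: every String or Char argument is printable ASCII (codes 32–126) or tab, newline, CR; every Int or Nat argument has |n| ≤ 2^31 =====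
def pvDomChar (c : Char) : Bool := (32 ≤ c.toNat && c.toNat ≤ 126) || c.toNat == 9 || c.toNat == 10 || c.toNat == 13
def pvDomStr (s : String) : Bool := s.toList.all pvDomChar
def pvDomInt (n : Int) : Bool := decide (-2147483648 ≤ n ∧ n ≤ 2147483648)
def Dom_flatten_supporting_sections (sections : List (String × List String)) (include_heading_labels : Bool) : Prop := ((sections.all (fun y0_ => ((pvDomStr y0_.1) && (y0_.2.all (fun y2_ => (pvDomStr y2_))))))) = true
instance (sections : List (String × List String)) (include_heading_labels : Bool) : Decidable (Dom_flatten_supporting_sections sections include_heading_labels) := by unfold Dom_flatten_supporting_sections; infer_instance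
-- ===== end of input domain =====

-- B materializes the full ordered candidate stream and then applies a stateless
-- positional filter (keep element i iff truthy and absent from candidates[:i]),
-- instead of A's fused append_once accumulator loop (objective: alternative;
-- A mutates no caller-visible argument, so equivalence is about the return value).


-- ===== PORT A =====
-- str.title() ported by hand over List Char: a letter is uppercased iff the
-- previous character is not a letter, otherwise lowercased; exact on the ASCII
-- domain (Python "cased" = ASCII letter there).
def pvTitleAux (prevCased : Bool) : List Char → List Char
  | [] => []
  | c :: cs =>
    if c.isAlpha then
      (if prevCased then c.toLower else c.toUpper) :: pvTitleAux true cs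
    else
      c :: pvTitleAux false cs

-- humanize_section_key: value.replace("_", " ").strip().title()
def pvHumanize (value : String) : String :=
  String.ofList (pvTitleAux false (PySem.Str.strip (PySem.Str.replace value "_" " ")).toList)

-- append_once: mutates its first argument in Python; ported as returning the new list
def pvAppendOnce (target : List String) (value : String) : List String :=
  if value ≠ "" ∧ value ∉ target then target ++ [value] else target

def flatten_supporting_sections (sections : List (String × List String)) (include_heading_labels : Bool) : List String :=
  sections.foldl
    (fun flattened kv =>
      let flattened :=
        if kv.1 ≠ "summary" ∧ include_heading_labels = true then
          pvAppendOnce flattened (pvHumanize kv.1)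
        else flattened
      kv.2.foldl pvAppendOnce flattened)
    []

-- ===== PORT B =====
def flatten_supporting_sections_alt (sections : List (String × List String)) (include_heading_labels : Bool) : List String :=
  -- stage 1: the ordered candidate stream
  let candidates : List String :=
    sections.foldl
      (fun cands kv =>
        (if kv.1 ≠ "summary" ∧ include_heading_labels = true then
            cands ++ [pvHumanize kv.1]
          else cands) ++ kv.2)
      []
  -- stage 2: stateless positional filter: keep (i, c) iff c truthy and c ∉ candidates[:i]
  ((PySem.List.enumerate candidates 0).filter
      (fun ic => ic.2 ≠ "" ∧ ic.2 ∉ PySem.List.slice candidates none (some ic.1))).map (·.2)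

-- ===== PRECONDITION & SPEC =====
def Spec_flatten_supporting_sections (sections : List (String × List String)) (include_heading_labels : Bool) (out : List String) : Prop := out = flatten_supporting_sections_alt sections include_heading_labels
instance (sections : List (String × List String)) (include_heading_labels : Bool) (out : List String) : Decidable (Spec_flatten_supporting_sections sections include_heading_labels out) := by unfold Spec_flatten_supporting_sections; infer_instance

-- ===== CLAIM (what is proved, stated in full; the proofs are below) =====
def Claim_equal_flatten_supporting_sections : Prop := ∀ (sections : List (String × List String)) (include_heading_labels : Bool), Dom_flatten_supporting_sections sections include_heading_labels → Spec_flatten_supporting_sections sections include_heading_labels (flatten_supporting_sections sections include_heading_labels)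

-- ===== LEMMAS AND PROOFS =====

-- the per-section chunk of the candidate stream
def pvChunk (include_heading_labels : Bool) (kv : String × List String) : List String :=
  (if kv.1 ≠ "summary" ∧ include_heading_labels = true then [pvHumanize kv.1] else []) ++ kv.2

-- B's stage 1 computes init ++ flatMap of the chunks
theorem pass1_eq_flatMap (inc : Bool) (sections : List (String × List String)) (init : List String) :
    sections.foldl
      (fun cands kv =>
        (if kv.1 ≠ "summary" ∧ inc = true then cands ++ [pvHumanize kv.1] else cands) ++ kv.2)
      init = init ++ sections.flatMap (pvChunk inc) := by
  induction sections generalizing init with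
  | nil => simp
  | cons kv tl ih =>
      simp only [List.foldl_cons, List.flatMap_cons, ih, pvChunk]
      split_ifs <;> simp

-- A's fused loop is a single foldl of append_once over the candidate stream
theorem portA_eq_foldl (inc : Bool) (sections : List (String × List String)) (init : List String) :
    sections.foldl
      (fun flattened kv =>
        let flattened :=
          if kv.1 ≠ "summary" ∧ inc = true then pvAppendOnce flattened (pvHumanize kv.1)
          else flattened
        kv.2.foldl pvAppendOnce flattened)
      init = (sections.flatMap (pvChunk inc)).foldl pvAppendOnce init := by
  induction sections generalizing init with
  | nil => simp
  | cons kv tl ih =>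
      simp only [List.foldl_cons, List.flatMap_cons, List.foldl_append, ih, pvChunk]
      split_ifs <;> simp [List.foldl_cons]

-- the append_once fold is the first-occurrence positional filter (take form):
-- invariant: res holds exactly the nonempty strings seen in the prefix `pre`
theorem foldl_appendOnce_eq_filter (cs : List String) :
    ∀ (pre res : List String), (∀ x, x ∈ res ↔ x ≠ "" ∧ x ∈ pre) →
    cs.foldl pvAppendOnce res =
      res ++ ((PySem.List.enumerate cs (pre.length : Int)).filter
        (fun ic => ic.2 ≠ "" ∧ ic.2 ∉ (pre ++ cs).take ic.1.toNat)).map (·.2) := by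
  induction cs with
  | nil => intro pre res _; simp [PySem.List.enumerate]
  | cons c tl ih =>
      intro pre res hinv
      rw [List.foldl_cons, PySem.List.enumerate_cons, List.filter_cons]
      have htake : (pre ++ c :: tl).take ((pre.length : Int)).toNat = pre := by
        simp
      have hcond : (decide (c ≠ "" ∧ c ∉ (pre ++ c :: tl).take ((pre.length : Int)).toNat) = true)
          ↔ (c ≠ "" ∧ c ∉ res) := by
        rw [decide_eq_true_iff, htake]
        constructor
        · rintro ⟨h1, h2⟩; exact ⟨h1, fun hm => h2 ((hinv c).1 hm).2⟩
        · rintro ⟨h1, h2⟩; exact ⟨h1, fun hm => h2 ((hinv c).2 ⟨h1, hm⟩)⟩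
      have hlist : pre ++ c :: tl = (pre ++ [c]) ++ tl := by simp
      have hlen : (pre.length : Int) + 1 = (((pre ++ [c]).length : Nat) : Int) := by
        simp
      by_cases h : c ≠ "" ∧ c ∉ res
      · rw [if_pos (hcond.2 h)]
        rw [show pvAppendOnce res c = res ++ [c] from by
          simp only [pvAppendOnce, if_pos h]]
        have hinv' : ∀ x, x ∈ res ++ [c] ↔ x ≠ "" ∧ x ∈ pre ++ [c] := by
          intro x
          simp only [List.mem_append, List.mem_singleton, hinv x]
          constructor
          · rintro (⟨h1, h2⟩ | rfl)
            · exact ⟨h1, Or.inl h2⟩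
            · exact ⟨h.1, Or.inr rfl⟩
          · rintro ⟨h1, h2 | rfl⟩
            · exact Or.inl ⟨h1, h2⟩
            · exact Or.inr rfl
        rw [ih (pre ++ [c]) (res ++ [c]) hinv', List.map_cons, hlist, hlen]
        simp
      · rw [if_neg (fun hx => h (hcond.1 hx))]
        rw [show pvAppendOnce res c = res from by
          simp only [pvAppendOnce, if_neg h]]
        have hinv' : ∀ x, x ∈ res ↔ x ≠ "" ∧ x ∈ pre ++ [c] := by
          intro x
          rw [hinv x]
          simp only [List.mem_append, List.mem_singleton]
          constructor
          · rintro ⟨h1, h2⟩; exact ⟨h1, Or.inl h2⟩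
          · rintro ⟨h1, h2 | rfl⟩
            · exact ⟨h1, h2⟩
            · -- c failed the append test: c = "" or c ∈ res; with x = c ≠ "" we get c ∈ pre
              rcases not_and_or.1 h with hc | hc
              · exact absurd h1 hc
              · exact ⟨h1, ((hinv x).1 (not_not.1 hc)).2⟩
        rw [ih (pre ++ [c]) res hinv']
        rw [hlen, hlist]

-- in B's port, every enumerate index is nonnegative, so the slice is a take
theorem filter_slice_eq_filter_take (cs : List String) :
    ((PySem.List.enumerate cs 0).filter
        (fun ic => ic.2 ≠ "" ∧ ic.2 ∉ PySem.List.slice cs none (some ic.1)))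
      = ((PySem.List.enumerate cs 0).filter
        (fun ic => ic.2 ≠ "" ∧ ic.2 ∉ cs.take ic.1.toNat)) := by
  apply List.filter_congr
  intro ic hmem
  rcases (PySem.List.mem_enumerate_iff _ _ _).1 hmem with ⟨k, hk, rfl⟩
  dsimp only
  rw [PySem.List.slice_to cs (b := 0 + (k:Int)) (by positivity)]

-- ===== VERDICT (by name: the statement is the Claim_ definition above) =====
theorem flatten_supporting_sections_spec : Claim_equal_flatten_supporting_sections := by
  intro sections inc _
  unfold Spec_flatten_supporting_sections flatten_supporting_sections flatten_supporting_sections_alt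
  rw [portA_eq_foldl, pass1_eq_flatMap, List.nil_append]
  show List.foldl pvAppendOnce [] (sections.flatMap (pvChunk inc)) =
    ((PySem.List.enumerate (sections.flatMap (pvChunk inc)) 0).filter
      (fun ic => ic.2 ≠ "" ∧ ic.2 ∉ PySem.List.slice (sections.flatMap (pvChunk inc)) none (some ic.1))).map (·.2)
  rw [filter_slice_eq_filter_take]
  have h := foldl_appendOnce_eq_filter (sections.flatMap (pvChunk inc)) [] []
    (by intro x; simp)
  simpa using h
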